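-- pv_equiv track=rewrite | github.com/CobyHong/CSC-349-Cal-Poly-2020 | asgn5-CobyHong/input.py | accumulator
-- ===== SOURCE A (Python) =====
-- def accumulator(dictionary):
--     degrees = []
--     for key in dictionary:
--         counter = len(dictionary[key])
--         degrees.append(tuple((key, counter)))
--     degrees.sort(key=lambda tup: tup[0])
--     degrees.sort(key=lambda tup: tup[1])
--     return degrees
-- ===== SOURCE B (Python) =====
-- def accumulator(dictionary):
--     groups = {}
--     for key in dictionary:
--         count = len(dictionary[key])
--         groups.setdefault(count, []).append(key)
--     result = []
--     for count in sorted(groups):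
--         for key in sorted(groups[count]):
--             result.append((key, count))
--     return result
-- ===== Notes on version B (the rewrite author's own statement) =====
-- stated objective: alternative
-- what changed: B buckets keys by their degree count in a dict built in one pass, then emits (key, count) pairs by iterating the distinct counts in ascending order with the keys of each bucket sorted, instead of building a flat tuple list and applying two stable sorts.
import Mathlib
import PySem

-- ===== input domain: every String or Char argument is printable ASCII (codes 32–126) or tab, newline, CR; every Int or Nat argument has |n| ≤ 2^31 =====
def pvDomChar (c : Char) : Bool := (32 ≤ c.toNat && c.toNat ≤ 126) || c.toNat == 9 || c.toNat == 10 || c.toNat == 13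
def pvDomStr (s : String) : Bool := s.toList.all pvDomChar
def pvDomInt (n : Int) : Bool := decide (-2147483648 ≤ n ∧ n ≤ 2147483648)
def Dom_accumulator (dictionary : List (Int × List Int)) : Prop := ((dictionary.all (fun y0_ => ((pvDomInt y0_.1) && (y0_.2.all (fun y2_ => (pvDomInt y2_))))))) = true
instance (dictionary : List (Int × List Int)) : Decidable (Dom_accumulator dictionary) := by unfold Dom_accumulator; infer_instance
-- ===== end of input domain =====

-- B groups keys by degree count in a dict and emits counts ascending / keys ascending,
-- instead of A's flat tuple list followed by two stable sorts (objective: alternative, same cost).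

-- ===== PORT A =====
-- 'for key in dictionary: counter = len(dictionary[key]); degrees.append((key, counter))'
-- visits each dict item once with its value; over the assoc-list encoding of a dict
-- (unique keys) this is one pass over the pairs.
def accumulator (dictionary : List (Int × List Int)) : List (Int × Int) :=
  let degrees : List (Int × Int) :=
    dictionary.foldl (fun acc p => acc ++ [(p.1, (p.2.length : Int))]) []
  let degrees := PySem.List.sorted degrees (fun tup => tup.1)
  let degrees := PySem.List.sorted degrees (fun tup => tup.2)
  degrees

-- ===== PORT B =====
-- 'groups.setdefault(count, []).append(key)' stores groups[count] = groups.get(count, []) + [key],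
-- which is exactly Dict.modify count [] (· ++ [key]).
def accumulator_alt (dictionary : List (Int × List Int)) : List (Int × Int) :=
  let groups : PySem.Dict Int (List Int) :=
    dictionary.foldl
      (fun d p => d.modify ((p.2.length : Int)) [] (fun ks => ks ++ [p.1]))
      PySem.Dict.empty
  (PySem.List.sorted groups.keys (fun c => c)).foldl
    (fun res c =>
      res ++ (PySem.List.sorted (groups.getD c []) (fun k => k)).map (fun k => (k, c)))
    []

-- ===== PRECONDITION & SPEC =====
def Spec_accumulator (dictionary : List (Int × List Int)) (out : List (Int × Int)) : Prop :=
  out = accumulator_alt dictionary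

instance (dictionary : List (Int × List Int)) (out : List (Int × Int)) : Decidable (Spec_accumulator dictionary out) := by
  unfold Spec_accumulator; infer_instance

-- ===== CLAIM (what is proved, stated in full; the proofs are below) =====
def Claim_equal_accumulator : Prop := ∀ (dictionary : List (Int × List Int)), Dom_accumulator dictionary → Spec_accumulator dictionary (accumulator dictionary)

-- ===== LEMMAS AND PROOFS =====

-- The order both outputs are sorted in: by count, then (on equal counts) by key.
def pvLex (a b : Int × Int) : Prop := a.2 ≤ b.2 ∧ (a.2 = b.2 → a.1 ≤ b.1)

theorem pvLex_antisymm (a b : Int × Int) (h1 : pvLex a b) (h2 : pvLex b a) : a = b := by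
  obtain ⟨h1a, h1b⟩ := h1; obtain ⟨h2a, h2b⟩ := h2
  have hc : a.2 = b.2 := le_antisymm h1a h2a
  have hk : a.1 = b.1 := le_antisymm (h1b hc) (h2b hc.symm)
  exact Prod.ext hk hc

-- Stability of Python's sort, as an insertion step: inserting x preserves the
-- "equal keys stay in their previous relative order r" invariant.
theorem pv_insertBy_stable {α κ : Type} [LinearOrder κ] (key : α → κ) (r : α → α → Prop)
    (x : α) (acc : List α)
    (hle : acc.Pairwise (fun a b => key a ≤ key b))
    (hq : acc.Pairwise (fun a b => key a = key b → r a b))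
    (hx : ∀ y ∈ acc, key y = key x → r y x) :
    (PySem.List.insertBy (fun a b => decide (key a < key b)) x acc).Pairwise
      (fun a b => key a = key b → r a b) := by
  induction acc with
  | nil => simp [PySem.List.insertBy]
  | cons y ys ih =>
    by_cases hlt : key x < key y
    · rw [PySem.List.insertBy, if_pos (by simpa using hlt)]
      refine List.Pairwise.cons ?_ hq
      intro z hz heq
      rcases List.mem_cons.mp hz with hz | hz
      · subst hz; exact absurd heq (ne_of_lt hlt)
      · have : key y ≤ key z := (List.pairwise_cons.mp hle).1 z hz
        exact absurd heq (ne_of_lt (lt_of_lt_of_le hlt this))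
    · rw [PySem.List.insertBy, if_neg (by simpa using hlt)]
      refine List.Pairwise.cons ?_ ?_
      · intro z hz heq
        rcases (PySem.List.mem_insertBy _ _ _ _).mp hz with hz | hz
        · subst hz; exact hx y (by simp) heq
        · exact (List.pairwise_cons.mp hq).1 z hz heq
      · exact ih (List.pairwise_cons.mp hle).2 (List.pairwise_cons.mp hq).2
          (fun y hy => hx y (by simp [hy]))

theorem pv_foldl_insertBy_stable {α κ : Type} [LinearOrder κ] (key : α → κ) (r : α → α → Prop)
    (xs : List α) : ∀ (acc : List α),
    acc.Pairwise (fun a b => key a ≤ key b) →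
    acc.Pairwise (fun a b => key a = key b → r a b) →
    xs.Pairwise (fun a b => key a = key b → r a b) →
    (∀ y ∈ acc, ∀ x ∈ xs, key y = key x → r y x) →
    (xs.foldl (fun acc x => PySem.List.insertBy (fun a b => decide (key a < key b)) x acc) acc).Pairwise
      (fun a b => key a = key b → r a b) := by
  induction xs with
  | nil => intro acc _ hq _ _; simpa using hq
  | cons x xs ih =>
    intro acc hle hq hxs hcross
    simp only [List.foldl_cons]
    refine ih _ (PySem.List.insertBy_pairwise_le key x acc hle)
      (pv_insertBy_stable key r x acc hle hq (fun y hy => hcross y hy x (by simp)))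
      (List.pairwise_cons.mp hxs).2 ?_
    intro y hy z hz
    rcases (PySem.List.mem_insertBy _ _ _ _).mp hy with hy | hy
    · subst hy; exact (List.pairwise_cons.mp hxs).1 z hz
    · exact hcross y hy z (by simp [hz])

-- Python's sort is stable: sorting by `key` preserves, among equal keys, any
-- relation r the input was already pairwise-ordered by.
theorem pv_sorted_stable {α κ : Type} [LinearOrder κ] (key : α → κ) (r : α → α → Prop)
    (xs : List α) (h : xs.Pairwise (fun a b => key a = key b → r a b)) :
    (PySem.List.sorted xs key).Pairwise (fun a b => key a = key b → r a b) := by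
  rw [PySem.List.sorted_eq_foldl_insertBy]
  exact pv_foldl_insertBy_stable key r xs [] (by simp) (by simp) h (by simp)

-- A's output: a permutation of the degree list, pairwise in pvLex order.
theorem pv_A_perm (dictionary : List (Int × List Int)) :
    (accumulator dictionary).Perm
      (dictionary.map (fun p => (p.1, (p.2.length : Int)))) := by
  unfold accumulator
  simp only [PySem.List.foldl_append_singleton_eq_map, List.nil_append]
  exact ((PySem.List.sorted_perm _ _ _).trans (PySem.List.sorted_perm _ _ _))

theorem pv_A_pairwise (dictionary : List (Int × List Int)) :
    (accumulator dictionary).Pairwise pvLex := by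
  unfold accumulator
  simp only [PySem.List.foldl_append_singleton_eq_map, List.nil_append]
  have h1 := PySem.List.sorted_pairwise
    (dictionary.map (fun p => (p.1, (p.2.length : Int)))) (fun tup => tup.1)
  have h2 := PySem.List.sorted_pairwise
    (PySem.List.sorted (dictionary.map (fun p => (p.1, (p.2.length : Int)))) (fun tup => tup.1))
    (fun tup => tup.2)
  have h1w : (PySem.List.sorted (dictionary.map (fun p => (p.1, (p.2.length : Int))))
      (fun tup => tup.1)).Pairwise
      (fun a b : Int × Int => a.2 = b.2 → a.1 ≤ b.1) := by
    refine h1.imp ?_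
    intro a b h _
    exact h
  have h3 := pv_sorted_stable (fun tup : Int × Int => tup.2) (fun a b => a.1 ≤ b.1)
    (PySem.List.sorted (dictionary.map (fun p => (p.1, (p.2.length : Int)))) (fun tup => tup.1))
    h1w
  exact (h2.and h3).imp (fun h => ⟨h.1, h.2⟩)

-- A flatMap of pointwise-permuted blocks is a permutation.
theorem pv_flatMap_perm {α β : Type} (cs : List α) (f g : α → List β)
    (h : ∀ c ∈ cs, (f c).Perm (g c)) : (cs.flatMap f).Perm (cs.flatMap g) := by
  induction cs with
  | nil => simp
  | cons c cs ih =>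
    simp only [List.flatMap_cons]
    exact (h c (by simp)).append (ih (fun c' hc' => h c' (by simp [hc'])))

-- Distribute a list over the distinct values of its second components.
theorem pv_flatMap_filter_perm (cs : List Int) : ∀ (L : List (Int × Int)), cs.Nodup →
    (∀ t ∈ L, t.2 ∈ cs) →
    (cs.flatMap (fun c => L.filter (fun t => t.2 == c))).Perm L := by
  induction cs with
  | nil =>
    intro L _ hmem
    have : L = [] := List.eq_nil_iff_forall_not_mem.mpr (fun t ht => by simpa using hmem t ht)
    simp [this]
  | cons c cs ih =>
    intro L hnd hmem
    rw [List.flatMap_cons]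
    have hsplit := List.filter_append_perm (fun t : Int × Int => t.2 == c) L
    refine List.Perm.trans (List.Perm.append_left _ ?_) hsplit
    have hrw : cs.flatMap (fun c' => L.filter (fun t => t.2 == c')) =
        cs.flatMap (fun c' => (L.filter (fun t => !(t.2 == c))).filter (fun t => t.2 == c')) := by
      apply List.flatMap_congr
      intro c' hc'
      rw [List.filter_filter]
      apply List.filter_congr
      intro t _
      have hne : c' ≠ c := fun h => (List.nodup_cons.mp hnd).1 (h ▸ hc')
      by_cases h : t.2 = c'
      · simp [h, hne]
      · simp [h]
    rw [hrw]
    refine ih _ (List.nodup_cons.mp hnd).2 ?_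
    intro t ht
    have ht' := List.mem_filter.mp ht
    have := hmem t ht'.1
    rcases List.mem_cons.mp this with h | h
    · exact absurd h (by simpa using ht'.2)
    · exact h

-- B's output, unfolded to a flatMap over the sorted distinct counts.
theorem pv_B_eq_flatMap (dictionary : List (Int × List Int)) :
    accumulator_alt dictionary =
      (PySem.List.sorted (PySem.Set.ofList (dictionary.map (fun p => (p.2.length : Int))))
          (fun c => c)).flatMap
        (fun c => (PySem.List.sorted
            ((dictionary.filter (fun p => ((p.2.length : Int) == c))).map Prod.fst)
            (fun k => k)).map (fun k => (k, c))) := by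
  have hdef : accumulator_alt dictionary =
      (PySem.List.sorted ((dictionary.foldl
          (fun d p => d.modify ((p.2.length : Int)) [] (fun ks => ks ++ [p.1]))
          PySem.Dict.empty).keys) (fun c => c)).foldl
        (fun res c => res ++ (PySem.List.sorted ((dictionary.foldl
            (fun d p => d.modify ((p.2.length : Int)) [] (fun ks => ks ++ [p.1]))
            PySem.Dict.empty).getD c []) (fun k => k)).map (fun k => (k, c))) [] := rfl
  rw [hdef]
  have hfold : dictionary.foldl
      (fun d p => d.modify ((p.2.length : Int)) [] (fun ks => ks ++ [p.1]))
      PySem.Dict.empty =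
      (dictionary.map (fun p => ((p.2.length : Int), p.1))).foldl
        (fun d q => d.modify q.1 [] (fun ks => ks ++ [q.2])) PySem.Dict.empty := by
    rw [List.foldl_map]
  rw [hfold]
  have hkeys : ((dictionary.map (fun p => ((p.2.length : Int), p.1))).foldl
      (fun d q => d.modify q.1 [] (fun ks => ks ++ [q.2])) PySem.Dict.empty).keys =
      PySem.Set.ofList (dictionary.map (fun p => (p.2.length : Int))) := by
    have := PySem.Dict.keys_foldl_modify_key
      (dictionary.map (fun p => ((p.2.length : Int), p.1))) (fun q => q.1) []
      (fun _ q => fun ks => ks ++ [q.2]) PySem.Dict.empty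
    simpa [List.map_map, Function.comp, PySem.Set.update_empty] using this
  rw [hkeys, PySem.List.foldl_append_eq_flatMap, List.nil_append]
  apply List.flatMap_congr
  intro c _
  have hg := PySem.Dict.getD_foldl_modify_append
    (dictionary.map (fun p => ((p.2.length : Int), p.1))) PySem.Dict.empty c
  rw [hg]
  simp only [PySem.Dict.getD_empty, List.nil_append, List.filter_map, List.map_map]
  rfl

theorem pv_B_perm (dictionary : List (Int × List Int)) :
    (accumulator_alt dictionary).Perm
      (dictionary.map (fun p => (p.1, (p.2.length : Int)))) := by
  rw [pv_B_eq_flatMap]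
  set L := dictionary.map (fun p => (p.1, (p.2.length : Int))) with hL
  set cs := PySem.List.sorted (PySem.Set.ofList (dictionary.map (fun p => (p.2.length : Int))))
      (fun c => c) with hcs
  have hblock : ∀ c, ((PySem.List.sorted
      ((dictionary.filter (fun p => ((p.2.length : Int) == c))).map Prod.fst)
      (fun k => k)).map (fun k => (k, c))).Perm (L.filter (fun t => t.2 == c)) := by
    intro c
    have h1 : (L.filter (fun t => t.2 == c)) =
        ((dictionary.filter (fun p => ((p.2.length : Int) == c))).map Prod.fst).map
          (fun k => (k, c)) := by
      rw [hL, List.filter_map, List.map_map]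
      apply List.map_congr_left
      intro p hp
      have := (List.mem_filter.mp hp).2
      simp only [Function.comp] at this ⊢
      have hc : (p.2.length : Int) = c := by simpa using this
      simp [hc]
    rw [h1]
    exact (PySem.List.sorted_perm _ _ _).map _
  have hperm1 : (cs.flatMap (fun c => (PySem.List.sorted
      ((dictionary.filter (fun p => ((p.2.length : Int) == c))).map Prod.fst)
      (fun k => k)).map (fun k => (k, c)))).Perm
      (cs.flatMap (fun c => L.filter (fun t => t.2 == c))) :=
    pv_flatMap_perm cs _ _ (fun c _ => hblock c)
  refine hperm1.trans (pv_flatMap_filter_perm cs L ?_ ?_)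
  · exact (PySem.List.sorted_perm _ _ _).nodup_iff.mpr (PySem.Set.nodup_ofList _)
  · intro t ht
    rw [hL] at ht
    obtain ⟨p, hp, hpt⟩ := List.mem_map.mp ht
    rw [hcs, PySem.List.mem_sorted, PySem.Set.mem_ofList]
    exact List.mem_map.mpr ⟨p, hp, by rw [← hpt]⟩

theorem pv_B_pairwise (dictionary : List (Int × List Int)) :
    (accumulator_alt dictionary).Pairwise pvLex := by
  rw [pv_B_eq_flatMap]
  rw [List.pairwise_flatMap]
  constructor
  · intro c _
    rw [List.pairwise_map]
    have := PySem.List.sorted_pairwise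
      ((dictionary.filter (fun p => ((p.2.length : Int) == c))).map Prod.fst) (fun k => k)
    exact this.imp (fun h => ⟨le_refl _, fun _ => h⟩)
  · have hlt := PySem.List.sorted_ofList_pairwise_lt
      (dictionary.map (fun p => (p.2.length : Int)))
    refine hlt.imp ?_
    intro c c' hcc x hx y hy
    obtain ⟨k, _, hk⟩ := List.mem_map.mp hx
    obtain ⟨k', _, hk'⟩ := List.mem_map.mp hy
    rw [← hk, ← hk']
    exact ⟨le_of_lt hcc, fun h => absurd h (ne_of_lt hcc)⟩

-- ===== VERDICT (by name: the statement is the Claim_ definition above) =====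
theorem accumulator_spec : Claim_equal_accumulator := by
  unfold Claim_equal_accumulator
  intro dictionary _
  unfold Spec_accumulator
  have hperm : (accumulator dictionary).Perm (accumulator_alt dictionary) :=
    (pv_A_perm dictionary).trans (pv_B_perm dictionary).symm
  exact List.Perm.eq_of_pairwise
    (fun a b _ _ h1 h2 => pvLex_antisymm a b h1 h2)
    (pv_A_pairwise dictionary) (pv_B_pairwise dictionary) hperm
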